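-- pv_equiv track=rewrite | github.com/WhatCats/fluffy-bot | duels/util.py | get_duels_title
-- ===== SOURCE A (Python) =====
-- from collections import OrderedDict
--
-- titles = {10000 : {"title" : "§5{}Godlike", "maxwins" : 28000, "steps" : 2000},
--           5000 : {"title" : "§e{}Grandmaster", "maxwins" : 10000, "steps" : 1000},
--           2000 : {"title" : "§4{}Legend", "maxwins" : 5000, "steps" : 600},
--           1000 : {"title" : "§2{}Master", "maxwins" : 2000, "steps" : 200},
--           500 : {"title" : "§3{}Diamond", "maxwins" : 1000, "steps" : 100},
--           250 : {"title" : "§6{}Gold", "maxwins" : 500, "steps" : 50},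
--           100 : {"title" : "§f{}Iron", "maxwins" : 250, "steps" : 30},
--           50 : {"title" : "§8{}Rookie", "maxwins" : 100, "steps" : 10}}
--
-- def write_roman(num):
--     roman = OrderedDict()
--     roman[9] = "IX"
--     roman[5] = "V"
--     roman[4] = "IV"
--     roman[1] = "I"
--
--     def roman_num(num):
--         for r in roman.keys():
--             x, _ = divmod(num, r)
--             yield roman[r] * x
--             num -= (r * x)
--             if num <= 0:
--                 break
--
--     return "".join([a for a in roman_num(num)])
--
-- def get_duels_title(wins, game="", default=""):
--     multi = 1
--     if game == "overall":
--         game = ""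
--
--     if game != "":
--         game = game + " "
--
--     if game == "":
--         multi = 2
--
--     if wins >= (28000*multi):
--         return f'§6✫ §5{game}Godlike X'
--
--     if wins < (50*multi):
--         return default
--
--     title = "Error"
--     for minwins, titledata in titles.items():
--         minwins *= multi
--         if wins >= minwins and wins < (titledata["maxwins"] * multi):
--             num = int((wins - minwins) / (titledata["steps"] * multi)) + 1
--
--             if num > 1:
--                 title = f'§6✫ {titledata["title"].format(game)} {write_roman(num)}'
--             else:
--                 title = f'§6✫ {titledata["title"].format(game)}'
--
--             break
--
--     return title
-- ===== SOURCE B (Python) =====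
-- _TIERS = [
--     (50, "\u00a78{}Rookie", 10),
--     (100, "\u00a7f{}Iron", 30),
--     (250, "\u00a76{}Gold", 50),
--     (500, "\u00a73{}Diamond", 100),
--     (1000, "\u00a72{}Master", 200),
--     (2000, "\u00a74{}Legend", 600),
--     (5000, "\u00a7e{}Grandmaster", 1000),
--     (10000, "\u00a75{}Godlike", 2000),
-- ]
-- _ROMAN = ["", "I", "II", "III", "IV", "V", "VI", "VII", "VIII", "IX"]
--
-- def get_duels_title(wins, game="", default=""):
--     if game == "" or game == "overall":
--         prefix, multi = "", 2
--     else: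
--         prefix, multi = game + " ", 1
--     if wins >= 28000 * multi:
--         return f'\u00a76\u272b \u00a75{prefix}Godlike X'
--     if wins < 50 * multi:
--         return default
--     # binary search for the greatest tier whose scaled lower bound is <= wins
--     lo, hi = 0, len(_TIERS)
--     while hi - lo > 1:
--         mid = (lo + hi) // 2
--         if wins >= _TIERS[mid][0] * multi:
--             lo = mid
--         else:
--             hi = mid
--     minwins, fmt, steps = _TIERS[lo]
--     num = (wins - minwins * multi) // (steps * multi) + 1
--     title = fmt.format(prefix)
--     if num > 1:
--         return f'\u00a76\u272b {title} {_ROMAN[num]}'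
--     return f'\u00a76\u272b {title}'
-- ===== Notes on version B (the rewrite author's own statement) =====
-- stated objective: alternative
-- what changed: Replaces the descending linear scan over the tier dict with a binary search over an ascending table of scaled tier lower-bounds, and replaces the OrderedDict/generator roman-numeral builder with a direct 0..9 lookup table.
import Mathlib
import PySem

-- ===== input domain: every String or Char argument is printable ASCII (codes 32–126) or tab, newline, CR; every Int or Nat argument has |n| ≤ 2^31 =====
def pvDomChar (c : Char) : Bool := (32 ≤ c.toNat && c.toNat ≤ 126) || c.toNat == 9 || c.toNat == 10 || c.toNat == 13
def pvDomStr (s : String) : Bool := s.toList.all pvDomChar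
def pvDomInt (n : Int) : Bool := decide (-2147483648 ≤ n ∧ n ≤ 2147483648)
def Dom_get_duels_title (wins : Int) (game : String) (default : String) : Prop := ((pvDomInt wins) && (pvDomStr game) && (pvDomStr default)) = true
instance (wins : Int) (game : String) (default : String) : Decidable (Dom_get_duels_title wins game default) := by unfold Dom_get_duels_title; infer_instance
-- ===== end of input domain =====

-- B replaces A's descending linear tier scan with a binary search over an ascending bound table
-- and A's OrderedDict/generator roman-numeral builder with a direct lookup table (objective: alternative).

-- ===== PORT A =====
-- A's titles dict in its insertion order; "title".format(game) = pre ++ game ++ name.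
def pvTitlesA : List (Int × String × String × Int × Int) :=
  [(10000, "§5", "Godlike", 28000, 2000),
   (5000, "§e", "Grandmaster", 10000, 1000),
   (2000, "§4", "Legend", 5000, 600),
   (1000, "§2", "Master", 2000, 200),
   (500, "§3", "Diamond", 1000, 100),
   (250, "§6", "Gold", 500, 50),
   (100, "§f", "Iron", 250, 30),
   (50, "§8", "Rookie", 100, 10)]

-- Python "s * x" on strings (empty for x ≤ 0)
def pvStrMul (s : String) (n : Int) : String := String.join (List.replicate n.toNat s)

-- the roman_num generator: for r in roman.keys(): x,_ = divmod(num,r); yield roman[r]*x; num -= r*x; break if num ≤ 0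
def pvRomanNum : List (Int × String) → Int → String
  | [], _ => ""
  | (r, sr) :: rest, num =>
    let x := PySem.Int.floordiv num r
    let piece := pvStrMul sr x
    let num' := num - r * x
    if num' ≤ 0 then piece else piece ++ pvRomanNum rest num'

def pvWriteRoman (num : Int) : String :=
  pvRomanNum [(9, "IX"), (5, "V"), (4, "IV"), (1, "I")] num

-- the for-loop over titles.items() with break; "Error" if no tier matches.
-- int((wins - minwins) / (steps*multi)): whenever this branch runs, wins ≥ minwins, so Python's
-- exact float division + int-truncation equals floor division (operands ≤ 2^31 ≪ 2^53): exact here.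
def pvTierLoop (wins mlt : Int) (g : String) : List (Int × String × String × Int × Int) → String
  | [] => "Error"
  | (minw, pre, name, maxw, steps) :: rest =>
    let minwins := minw * mlt
    if wins ≥ minwins ∧ wins < maxw * mlt then
      let num := PySem.Int.floordiv (wins - minwins) (steps * mlt) + 1
      if num > 1 then "§6✫ " ++ pre ++ g ++ name ++ " " ++ pvWriteRoman num
      else "§6✫ " ++ pre ++ g ++ name
    else pvTierLoop wins mlt g rest

def get_duels_title (wins : Int) (game : String) (default : String) : String :=
  let multi : Int := 1
  let game1 := if game == "overall" then "" else game
  let game2 := if game1 != "" then game1 ++ " " else game1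
  let multi := if game2 == "" then 2 else multi
  if wins ≥ 28000 * multi then "§6✫ §5" ++ game2 ++ "Godlike X"
  else if wins < 50 * multi then default
  else pvTierLoop wins multi game2 pvTitlesA

-- ===== PORT B =====
-- B's ascending tier table: (minwins, pre, name, steps); fmt.format(prefix) = pre ++ prefix ++ name.
def pvTiersB : List (Int × String × String × Int) :=
  [(50, "§8", "Rookie", 10),
   (100, "§f", "Iron", 30),
   (250, "§6", "Gold", 50),
   (500, "§3", "Diamond", 100),
   (1000, "§2", "Master", 200),
   (2000, "§4", "Legend", 600),
   (5000, "§e", "Grandmaster", 1000),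
   (10000, "§5", "Godlike", 2000)]

def pvRomanTable : List String := ["", "I", "II", "III", "IV", "V", "VI", "VII", "VIII", "IX"]

-- the while-loop binary search; lo, hi always stay within [0, 8] so _TIERS[mid] never raises
def pvBsearch (wins mlt : Int) (lo hi : Nat) : Nat :=
  if _h : hi - lo > 1 then
    let mid := (lo + hi) / 2
    if wins ≥ (pvTiersB.getD mid (0, "", "", 0)).1 * mlt then pvBsearch wins mlt mid hi
    else pvBsearch wins mlt lo mid
  else lo
termination_by hi - lo
decreasing_by all_goals omega

def get_duels_title_alt (wins : Int) (game : String) (default : String) : String :=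
  let pm := if game == "" || game == "overall" then ("", (2 : Int)) else (game ++ " ", (1 : Int))
  let pfx := pm.1
  let multi := pm.2
  if wins ≥ 28000 * multi then "§6✫ §5" ++ pfx ++ "Godlike X"
  else if wins < 50 * multi then default
  else
    let t := pvTiersB.getD (pvBsearch wins multi 0 pvTiersB.length) (0, "", "", 0)
    let num := PySem.Int.floordiv (wins - t.1 * multi) (t.2.2.2 * multi) + 1
    let title := t.2.1 ++ pfx ++ t.2.2.1
    -- _ROMAN[num]: 2 ≤ num ≤ 9 whenever read, so the index is always in range
    if num > 1 then "§6✫ " ++ title ++ " " ++ (PySem.List.pyGet? pvRomanTable num).getD ""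
    else "§6✫ " ++ title

-- ===== PRECONDITION & SPEC =====
def Spec_get_duels_title (wins : Int) (game : String) (default : String) (out : String) : Prop := out = get_duels_title_alt wins game default
instance (wins : Int) (game : String) (default : String) (out : String) : Decidable (Spec_get_duels_title wins game default out) := by unfold Spec_get_duels_title; infer_instance

-- ===== CLAIM (what is proved, stated in full; the proofs are below) =====
def Claim_equal_get_duels_title : Prop := ∀ (wins : Int) (game : String) (default : String), Dom_get_duels_title wins game default → Spec_get_duels_title wins game default (get_duels_title wins game default)

-- ===== LEMMAS AND PROOFS =====

lemma pvRoman_eq_table (n : Int) (h2 : 2 ≤ n) (h9 : n ≤ 9) :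
    pvWriteRoman n = (PySem.List.pyGet? pvRomanTable n).getD "" := by
  interval_cases n <;> decide

-- closed form of the binary search on the 8-entry table
lemma bs_char (w m : Int) :
    pvBsearch w m 0 8 =
      (if w ≥ 1000 * m then
        (if w ≥ 5000 * m then (if w ≥ 10000 * m then 7 else 6)
         else (if w ≥ 2000 * m then 5 else 4))
       else
        (if w ≥ 250 * m then (if w ≥ 500 * m then 3 else 2)
         else (if w ≥ 100 * m then 1 else 0))) := by
  rw [pvBsearch.eq_def]
  norm_num [pvTiersB]
  split_ifs <;> (repeat (rw [pvBsearch.eq_def]; norm_num [pvTiersB, *]))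

-- the matched tier's output on both sides agree (roman table = write_roman for 2..9)
lemma tier_close (wins mlt minw maxw steps : Int) (g pre name : String)
    (hmax : wins < maxw * mlt)
    (hd : 0 < steps * mlt) (hspan : maxw * mlt - minw * mlt ≤ 9 * (steps * mlt)) :
    (if PySem.Int.floordiv (wins - minw * mlt) (steps * mlt) + 1 > 1 then
        "§6✫ " ++ pre ++ g ++ name ++ " " ++ pvWriteRoman (PySem.Int.floordiv (wins - minw * mlt) (steps * mlt) + 1)
     else "§6✫ " ++ pre ++ g ++ name)
    = (if PySem.Int.floordiv (wins - minw * mlt) (steps * mlt) + 1 > 1 then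
        "§6✫ " ++ (pre ++ g ++ name) ++ " " ++ (PySem.List.pyGet? pvRomanTable (PySem.Int.floordiv (wins - minw * mlt) (steps * mlt) + 1)).getD ""
       else "§6✫ " ++ (pre ++ g ++ name)) := by
  have hfd : PySem.Int.floordiv (wins - minw * mlt) (steps * mlt) = (wins - minw * mlt) / (steps * mlt) :=
    PySem.Int.floordiv_eq_ediv_of_pos hd
  have h9 : PySem.Int.floordiv (wins - minw * mlt) (steps * mlt) + 1 ≤ 9 := by
    rw [hfd]
    have hlt : (wins - minw * mlt) / (steps * mlt) < 9 :=
      Int.ediv_lt_of_lt_mul hd (by linarith)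
    omega
  by_cases hn : PySem.Int.floordiv (wins - minw * mlt) (steps * mlt) + 1 > 1
  · have h2n : 2 ≤ PySem.Int.floordiv (wins - minw * mlt) (steps * mlt) + 1 := by omega
    rw [if_pos hn, if_pos hn, pvRoman_eq_table _ h2n h9]
    simp [String.append_assoc]
  · rw [if_neg hn, if_neg hn]
    simp [String.append_assoc]

-- A's tier scan = B's binary-search tail on the non-Godlike, non-default range
lemma pvMain (mlt : Int) (hm : mlt = 1 ∨ mlt = 2) (wins : Int) (g : String)
    (h1 : 50 * mlt ≤ wins) (h2 : wins < 28000 * mlt) :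
    pvTierLoop wins mlt g pvTitlesA
      = (let t := pvTiersB.getD (pvBsearch wins mlt 0 pvTiersB.length) (0, "", "", 0);
         let num := PySem.Int.floordiv (wins - t.1 * mlt) (t.2.2.2 * mlt) + 1;
         let title := t.2.1 ++ g ++ t.2.2.1;
         if num > 1 then "§6✫ " ++ title ++ " " ++ (PySem.List.pyGet? pvRomanTable num).getD ""
         else "§6✫ " ++ title) := by
  rcases hm with rfl | rfl
  · -- mlt = 1
    by_cases c4 : wins ≥ 1000 * 1
    · by_cases c6 : wins ≥ 5000 * 1
      · by_cases c7 : wins ≥ 10000 * 1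
        · -- tier 7
          have hb : pvBsearch wins 1 0 pvTiersB.length = 7 := by
            rw [show pvTiersB.length = 8 from rfl, bs_char]; split_ifs <;> omega
          rw [hb, show pvTiersB.getD 7 (0, "", "", 0) = (10000, "§5", "Godlike", 2000) from rfl]
          simp only [pvTierLoop, pvTitlesA]
          rw [if_pos (show wins ≥ 10000 * 1 ∧ wins < 28000 * 1 by omega)]
          exact tier_close wins 1 10000 28000 2000 g "§5" "Godlike" (by omega) (by norm_num) (by norm_num)
        · -- tier 6
          have hb : pvBsearch wins 1 0 pvTiersB.length = 6 := by
            rw [show pvTiersB.length = 8 from rfl, bs_char]; split_ifs <;> omega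
          rw [hb, show pvTiersB.getD 6 (0, "", "", 0) = (5000, "§e", "Grandmaster", 1000) from rfl]
          simp only [pvTierLoop, pvTitlesA]
          rw [if_neg (show ¬(wins ≥ 10000 * 1 ∧ wins < 28000 * 1) by omega)]
          rw [if_pos (show wins ≥ 5000 * 1 ∧ wins < 10000 * 1 by omega)]
          exact tier_close wins 1 5000 10000 1000 g "§e" "Grandmaster" (by omega) (by norm_num) (by norm_num)
      · by_cases c5 : wins ≥ 2000 * 1
        · -- tier 5
          have hb : pvBsearch wins 1 0 pvTiersB.length = 5 := by
            rw [show pvTiersB.length = 8 from rfl, bs_char]; split_ifs <;> omega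
          rw [hb, show pvTiersB.getD 5 (0, "", "", 0) = (2000, "§4", "Legend", 600) from rfl]
          simp only [pvTierLoop, pvTitlesA]
          rw [if_neg (show ¬(wins ≥ 10000 * 1 ∧ wins < 28000 * 1) by omega)]
          rw [if_neg (show ¬(wins ≥ 5000 * 1 ∧ wins < 10000 * 1) by omega)]
          rw [if_pos (show wins ≥ 2000 * 1 ∧ wins < 5000 * 1 by omega)]
          exact tier_close wins 1 2000 5000 600 g "§4" "Legend" (by omega) (by norm_num) (by norm_num)
        · -- tier 4
          have hb : pvBsearch wins 1 0 pvTiersB.length = 4 := by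
            rw [show pvTiersB.length = 8 from rfl, bs_char]; split_ifs <;> omega
          rw [hb, show pvTiersB.getD 4 (0, "", "", 0) = (1000, "§2", "Master", 200) from rfl]
          simp only [pvTierLoop, pvTitlesA]
          rw [if_neg (show ¬(wins ≥ 10000 * 1 ∧ wins < 28000 * 1) by omega)]
          rw [if_neg (show ¬(wins ≥ 5000 * 1 ∧ wins < 10000 * 1) by omega)]
          rw [if_neg (show ¬(wins ≥ 2000 * 1 ∧ wins < 5000 * 1) by omega)]
          rw [if_pos (show wins ≥ 1000 * 1 ∧ wins < 2000 * 1 by omega)]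
          exact tier_close wins 1 1000 2000 200 g "§2" "Master" (by omega) (by norm_num) (by norm_num)
    · by_cases c2 : wins ≥ 250 * 1
      · by_cases c3 : wins ≥ 500 * 1
        · -- tier 3
          have hb : pvBsearch wins 1 0 pvTiersB.length = 3 := by
            rw [show pvTiersB.length = 8 from rfl, bs_char]; split_ifs <;> omega
          rw [hb, show pvTiersB.getD 3 (0, "", "", 0) = (500, "§3", "Diamond", 100) from rfl]
          simp only [pvTierLoop, pvTitlesA]
          rw [if_neg (show ¬(wins ≥ 10000 * 1 ∧ wins < 28000 * 1) by omega)]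
          rw [if_neg (show ¬(wins ≥ 5000 * 1 ∧ wins < 10000 * 1) by omega)]
          rw [if_neg (show ¬(wins ≥ 2000 * 1 ∧ wins < 5000 * 1) by omega)]
          rw [if_neg (show ¬(wins ≥ 1000 * 1 ∧ wins < 2000 * 1) by omega)]
          rw [if_pos (show wins ≥ 500 * 1 ∧ wins < 1000 * 1 by omega)]
          exact tier_close wins 1 500 1000 100 g "§3" "Diamond" (by omega) (by norm_num) (by norm_num)
        · -- tier 2
          have hb : pvBsearch wins 1 0 pvTiersB.length = 2 := by
            rw [show pvTiersB.length = 8 from rfl, bs_char]; split_ifs <;> omega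
          rw [hb, show pvTiersB.getD 2 (0, "", "", 0) = (250, "§6", "Gold", 50) from rfl]
          simp only [pvTierLoop, pvTitlesA]
          rw [if_neg (show ¬(wins ≥ 10000 * 1 ∧ wins < 28000 * 1) by omega)]
          rw [if_neg (show ¬(wins ≥ 5000 * 1 ∧ wins < 10000 * 1) by omega)]
          rw [if_neg (show ¬(wins ≥ 2000 * 1 ∧ wins < 5000 * 1) by omega)]
          rw [if_neg (show ¬(wins ≥ 1000 * 1 ∧ wins < 2000 * 1) by omega)]
          rw [if_neg (show ¬(wins ≥ 500 * 1 ∧ wins < 1000 * 1) by omega)]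
          rw [if_pos (show wins ≥ 250 * 1 ∧ wins < 500 * 1 by omega)]
          exact tier_close wins 1 250 500 50 g "§6" "Gold" (by omega) (by norm_num) (by norm_num)
      · by_cases c1 : wins ≥ 100 * 1
        · -- tier 1
          have hb : pvBsearch wins 1 0 pvTiersB.length = 1 := by
            rw [show pvTiersB.length = 8 from rfl, bs_char]; split_ifs <;> omega
          rw [hb, show pvTiersB.getD 1 (0, "", "", 0) = (100, "§f", "Iron", 30) from rfl]
          simp only [pvTierLoop, pvTitlesA]
          rw [if_neg (show ¬(wins ≥ 10000 * 1 ∧ wins < 28000 * 1) by omega)]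
          rw [if_neg (show ¬(wins ≥ 5000 * 1 ∧ wins < 10000 * 1) by omega)]
          rw [if_neg (show ¬(wins ≥ 2000 * 1 ∧ wins < 5000 * 1) by omega)]
          rw [if_neg (show ¬(wins ≥ 1000 * 1 ∧ wins < 2000 * 1) by omega)]
          rw [if_neg (show ¬(wins ≥ 500 * 1 ∧ wins < 1000 * 1) by omega)]
          rw [if_neg (show ¬(wins ≥ 250 * 1 ∧ wins < 500 * 1) by omega)]
          rw [if_pos (show wins ≥ 100 * 1 ∧ wins < 250 * 1 by omega)]
          exact tier_close wins 1 100 250 30 g "§f" "Iron" (by omega) (by norm_num) (by norm_num)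
        · -- tier 0
          have hb : pvBsearch wins 1 0 pvTiersB.length = 0 := by
            rw [show pvTiersB.length = 8 from rfl, bs_char]; split_ifs <;> omega
          rw [hb, show pvTiersB.getD 0 (0, "", "", 0) = (50, "§8", "Rookie", 10) from rfl]
          simp only [pvTierLoop, pvTitlesA]
          rw [if_neg (show ¬(wins ≥ 10000 * 1 ∧ wins < 28000 * 1) by omega)]
          rw [if_neg (show ¬(wins ≥ 5000 * 1 ∧ wins < 10000 * 1) by omega)]
          rw [if_neg (show ¬(wins ≥ 2000 * 1 ∧ wins < 5000 * 1) by omega)]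
          rw [if_neg (show ¬(wins ≥ 1000 * 1 ∧ wins < 2000 * 1) by omega)]
          rw [if_neg (show ¬(wins ≥ 500 * 1 ∧ wins < 1000 * 1) by omega)]
          rw [if_neg (show ¬(wins ≥ 250 * 1 ∧ wins < 500 * 1) by omega)]
          rw [if_neg (show ¬(wins ≥ 100 * 1 ∧ wins < 250 * 1) by omega)]
          rw [if_pos (show wins ≥ 50 * 1 ∧ wins < 100 * 1 by omega)]
          exact tier_close wins 1 50 100 10 g "§8" "Rookie" (by omega) (by norm_num) (by norm_num)
  · -- mlt = 2
    by_cases c4 : wins ≥ 1000 * 2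
    · by_cases c6 : wins ≥ 5000 * 2
      · by_cases c7 : wins ≥ 10000 * 2
        · -- tier 7
          have hb : pvBsearch wins 2 0 pvTiersB.length = 7 := by
            rw [show pvTiersB.length = 8 from rfl, bs_char]; split_ifs <;> omega
          rw [hb, show pvTiersB.getD 7 (0, "", "", 0) = (10000, "§5", "Godlike", 2000) from rfl]
          simp only [pvTierLoop, pvTitlesA]
          rw [if_pos (show wins ≥ 10000 * 2 ∧ wins < 28000 * 2 by omega)]
          exact tier_close wins 2 10000 28000 2000 g "§5" "Godlike" (by omega) (by norm_num) (by norm_num)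
        · -- tier 6
          have hb : pvBsearch wins 2 0 pvTiersB.length = 6 := by
            rw [show pvTiersB.length = 8 from rfl, bs_char]; split_ifs <;> omega
          rw [hb, show pvTiersB.getD 6 (0, "", "", 0) = (5000, "§e", "Grandmaster", 1000) from rfl]
          simp only [pvTierLoop, pvTitlesA]
          rw [if_neg (show ¬(wins ≥ 10000 * 2 ∧ wins < 28000 * 2) by omega)]
          rw [if_pos (show wins ≥ 5000 * 2 ∧ wins < 10000 * 2 by omega)]
          exact tier_close wins 2 5000 10000 1000 g "§e" "Grandmaster" (by omega) (by norm_num) (by norm_num)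
      · by_cases c5 : wins ≥ 2000 * 2
        · -- tier 5
          have hb : pvBsearch wins 2 0 pvTiersB.length = 5 := by
            rw [show pvTiersB.length = 8 from rfl, bs_char]; split_ifs <;> omega
          rw [hb, show pvTiersB.getD 5 (0, "", "", 0) = (2000, "§4", "Legend", 600) from rfl]
          simp only [pvTierLoop, pvTitlesA]
          rw [if_neg (show ¬(wins ≥ 10000 * 2 ∧ wins < 28000 * 2) by omega)]
          rw [if_neg (show ¬(wins ≥ 5000 * 2 ∧ wins < 10000 * 2) by omega)]
          rw [if_pos (show wins ≥ 2000 * 2 ∧ wins < 5000 * 2 by omega)]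
          exact tier_close wins 2 2000 5000 600 g "§4" "Legend" (by omega) (by norm_num) (by norm_num)
        · -- tier 4
          have hb : pvBsearch wins 2 0 pvTiersB.length = 4 := by
            rw [show pvTiersB.length = 8 from rfl, bs_char]; split_ifs <;> omega
          rw [hb, show pvTiersB.getD 4 (0, "", "", 0) = (1000, "§2", "Master", 200) from rfl]
          simp only [pvTierLoop, pvTitlesA]
          rw [if_neg (show ¬(wins ≥ 10000 * 2 ∧ wins < 28000 * 2) by omega)]
          rw [if_neg (show ¬(wins ≥ 5000 * 2 ∧ wins < 10000 * 2) by omega)]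
          rw [if_neg (show ¬(wins ≥ 2000 * 2 ∧ wins < 5000 * 2) by omega)]
          rw [if_pos (show wins ≥ 1000 * 2 ∧ wins < 2000 * 2 by omega)]
          exact tier_close wins 2 1000 2000 200 g "§2" "Master" (by omega) (by norm_num) (by norm_num)
    · by_cases c2 : wins ≥ 250 * 2
      · by_cases c3 : wins ≥ 500 * 2
        · -- tier 3
          have hb : pvBsearch wins 2 0 pvTiersB.length = 3 := by
            rw [show pvTiersB.length = 8 from rfl, bs_char]; split_ifs <;> omega
          rw [hb, show pvTiersB.getD 3 (0, "", "", 0) = (500, "§3", "Diamond", 100) from rfl]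
          simp only [pvTierLoop, pvTitlesA]
          rw [if_neg (show ¬(wins ≥ 10000 * 2 ∧ wins < 28000 * 2) by omega)]
          rw [if_neg (show ¬(wins ≥ 5000 * 2 ∧ wins < 10000 * 2) by omega)]
          rw [if_neg (show ¬(wins ≥ 2000 * 2 ∧ wins < 5000 * 2) by omega)]
          rw [if_neg (show ¬(wins ≥ 1000 * 2 ∧ wins < 2000 * 2) by omega)]
          rw [if_pos (show wins ≥ 500 * 2 ∧ wins < 1000 * 2 by omega)]
          exact tier_close wins 2 500 1000 100 g "§3" "Diamond" (by omega) (by norm_num) (by norm_num)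
        · -- tier 2
          have hb : pvBsearch wins 2 0 pvTiersB.length = 2 := by
            rw [show pvTiersB.length = 8 from rfl, bs_char]; split_ifs <;> omega
          rw [hb, show pvTiersB.getD 2 (0, "", "", 0) = (250, "§6", "Gold", 50) from rfl]
          simp only [pvTierLoop, pvTitlesA]
          rw [if_neg (show ¬(wins ≥ 10000 * 2 ∧ wins < 28000 * 2) by omega)]
          rw [if_neg (show ¬(wins ≥ 5000 * 2 ∧ wins < 10000 * 2) by omega)]
          rw [if_neg (show ¬(wins ≥ 2000 * 2 ∧ wins < 5000 * 2) by omega)]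
          rw [if_neg (show ¬(wins ≥ 1000 * 2 ∧ wins < 2000 * 2) by omega)]
          rw [if_neg (show ¬(wins ≥ 500 * 2 ∧ wins < 1000 * 2) by omega)]
          rw [if_pos (show wins ≥ 250 * 2 ∧ wins < 500 * 2 by omega)]
          exact tier_close wins 2 250 500 50 g "§6" "Gold" (by omega) (by norm_num) (by norm_num)
      · by_cases c1 : wins ≥ 100 * 2
        · -- tier 1
          have hb : pvBsearch wins 2 0 pvTiersB.length = 1 := by
            rw [show pvTiersB.length = 8 from rfl, bs_char]; split_ifs <;> omega
          rw [hb, show pvTiersB.getD 1 (0, "", "", 0) = (100, "§f", "Iron", 30) from rfl]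
          simp only [pvTierLoop, pvTitlesA]
          rw [if_neg (show ¬(wins ≥ 10000 * 2 ∧ wins < 28000 * 2) by omega)]
          rw [if_neg (show ¬(wins ≥ 5000 * 2 ∧ wins < 10000 * 2) by omega)]
          rw [if_neg (show ¬(wins ≥ 2000 * 2 ∧ wins < 5000 * 2) by omega)]
          rw [if_neg (show ¬(wins ≥ 1000 * 2 ∧ wins < 2000 * 2) by omega)]
          rw [if_neg (show ¬(wins ≥ 500 * 2 ∧ wins < 1000 * 2) by omega)]
          rw [if_neg (show ¬(wins ≥ 250 * 2 ∧ wins < 500 * 2) by omega)]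
          rw [if_pos (show wins ≥ 100 * 2 ∧ wins < 250 * 2 by omega)]
          exact tier_close wins 2 100 250 30 g "§f" "Iron" (by omega) (by norm_num) (by norm_num)
        · -- tier 0
          have hb : pvBsearch wins 2 0 pvTiersB.length = 0 := by
            rw [show pvTiersB.length = 8 from rfl, bs_char]; split_ifs <;> omega
          rw [hb, show pvTiersB.getD 0 (0, "", "", 0) = (50, "§8", "Rookie", 10) from rfl]
          simp only [pvTierLoop, pvTitlesA]
          rw [if_neg (show ¬(wins ≥ 10000 * 2 ∧ wins < 28000 * 2) by omega)]
          rw [if_neg (show ¬(wins ≥ 5000 * 2 ∧ wins < 10000 * 2) by omega)]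
          rw [if_neg (show ¬(wins ≥ 2000 * 2 ∧ wins < 5000 * 2) by omega)]
          rw [if_neg (show ¬(wins ≥ 1000 * 2 ∧ wins < 2000 * 2) by omega)]
          rw [if_neg (show ¬(wins ≥ 500 * 2 ∧ wins < 1000 * 2) by omega)]
          rw [if_neg (show ¬(wins ≥ 250 * 2 ∧ wins < 500 * 2) by omega)]
          rw [if_neg (show ¬(wins ≥ 100 * 2 ∧ wins < 250 * 2) by omega)]
          rw [if_pos (show wins ≥ 50 * 2 ∧ wins < 100 * 2 by omega)]
          exact tier_close wins 2 50 100 10 g "§8" "Rookie" (by omega) (by norm_num) (by norm_num)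


-- A's and B's identical outer guards, then pvMain for the tier range
lemma pvWrap (wins mlt : Int) (hm : mlt = 1 ∨ mlt = 2) (g dflt : String) :
    (if wins ≥ 28000 * mlt then "§6✫ §5" ++ g ++ "Godlike X"
     else if wins < 50 * mlt then dflt
     else pvTierLoop wins mlt g pvTitlesA)
    = (if wins ≥ 28000 * mlt then "§6✫ §5" ++ g ++ "Godlike X"
       else if wins < 50 * mlt then dflt
       else
         let t := pvTiersB.getD (pvBsearch wins mlt 0 pvTiersB.length) (0, "", "", 0);
         let num := PySem.Int.floordiv (wins - t.1 * mlt) (t.2.2.2 * mlt) + 1;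
         let title := t.2.1 ++ g ++ t.2.2.1;
         if num > 1 then "§6✫ " ++ title ++ " " ++ (PySem.List.pyGet? pvRomanTable num).getD ""
         else "§6✫ " ++ title) := by
  by_cases hA : wins ≥ 28000 * mlt
  · rw [if_pos hA, if_pos hA]
  · rw [if_neg hA, if_neg hA]
    by_cases hB : wins < 50 * mlt
    · rw [if_pos hB, if_pos hB]
    · rw [if_neg hB, if_neg hB]
      exact pvMain mlt hm wins g (by omega) (by omega)

-- ===== VERDICT (by name: the statement is the Claim_ definition above) =====
theorem get_duels_title_spec : Claim_equal_get_duels_title := by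
  intro wins game default _
  unfold Spec_get_duels_title get_duels_title get_duels_title_alt
  by_cases hov : game = "overall"
  · subst hov
    exact pvWrap wins 2 (Or.inr rfl) "" default
  · by_cases h0 : game = ""
    · subst h0
      exact pvWrap wins 2 (Or.inr rfl) "" default
    · have e1 : (game == "overall") = false := by simp [hov]
      have e2 : (game == "") = false := by simp [h0]
      have e3 : (game != "") = true := by simp [h0]
      have e4 : ((game ++ " ") == "") = false := by
        simp only [beq_eq_false_iff_ne]
        intro h
        have hl := congrArg String.length h
        simp [String.length_append] at hl
      simp only [e1, e2, e3, e4, Bool.false_eq_true, if_false, if_true, Bool.false_or]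
      exact pvWrap wins 1 (Or.inl rfl) (game ++ " ") default
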